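-- pv_equiv track=rewrite | github.com/MrBrantCode/unitest_baseline | mut_generate/mist_train_cf/cf_11106/solution.py | contains_all_vowels_in_order
-- ===== SOURCE A (Python) =====
-- def contains_all_vowels_in_order(string):
--     vowels = "aeiou"
--     vowel_index = 0
--
--     for char in string.lower():
--         if char == vowels[vowel_index]:
--             vowel_index += 1
--             if vowel_index == len(vowels):
--                 return True
--
--     return False
-- ===== SOURCE B (Python) =====
-- def contains_all_vowels_in_order(string):
--     s = string.lower()
--     end = len(s)
--     for v in "uoiea":
--         end = s.rfind(v, 0, end)
--         if end == -1:
--             return False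
--     return True
-- ===== Notes on version B (the rewrite author's own statement) =====
-- stated objective: alternative
-- what changed: B replaces A's single left-to-right per-character scan with a right-to-left greedy: for each vowel in reverse order (u,o,i,e,a) it takes the last occurrence strictly before the previous match via str.rfind with an end bound; correctness follows from subsequence existence being symmetric under string reversal.
import Mathlib
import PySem

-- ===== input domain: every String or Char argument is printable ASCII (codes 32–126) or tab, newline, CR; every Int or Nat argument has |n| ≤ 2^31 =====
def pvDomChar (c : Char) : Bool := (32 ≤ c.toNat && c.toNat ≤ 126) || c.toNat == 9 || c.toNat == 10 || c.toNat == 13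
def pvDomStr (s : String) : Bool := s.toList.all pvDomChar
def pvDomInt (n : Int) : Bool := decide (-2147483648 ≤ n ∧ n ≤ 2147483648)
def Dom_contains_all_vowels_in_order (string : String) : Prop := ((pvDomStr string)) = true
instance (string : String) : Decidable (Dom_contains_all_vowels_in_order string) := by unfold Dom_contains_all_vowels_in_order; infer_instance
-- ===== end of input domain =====

-- B scans right-to-left: for each vowel in reverse order it takes the last occurrence
-- strictly before the previous match (str.rfind with an end bound); A scans left-to-right
-- once with a vowel index. Proved equal (alternative traversal, same cost).

-- ===== PORT A =====
-- the loop 'for char in string.lower(): …' with state vowel_index and early return True;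
-- vowels[vowel_index] is always in range in Python (early return at 5), so getD is exact here
def pvLoopA (vowels : List Char) : List Char → Nat → Bool
  | [], _ => false
  | c :: cs, i =>
      if c == vowels.getD i ' ' then
        (if i + 1 == vowels.length then true else pvLoopA vowels cs (i + 1))
      else pvLoopA vowels cs i

def contains_all_vowels_in_order (string : String) : Bool :=
  pvLoopA ['a', 'e', 'i', 'o', 'u'] (PySem.Str.lower string).toList 0

-- ===== PORT B =====
-- s.rfind(v, 0, e): largest index i < e with s[i] = v (none = Python's -1); exact, a plain
-- character search ported by hand since PySem has no rfind
def pvRFind (v : Char) : List Char → Nat → Option Nat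
  | [], _ => none
  | c :: cs, e =>
      if e = 0 then none
      else
        match pvRFind v cs (e - 1) with
        | some i => some (i + 1)
        | none => if c == v then some 0 else none

-- the loop 'for v in "uoiea": end = s.rfind(v, 0, end); if end == -1: return False'
def pvLoopB : List Char → List Char → Nat → Bool
  | [], _, _ => true
  | v :: vs, cs, e =>
      match pvRFind v cs e with
      | none => false
      | some i => pvLoopB vs cs i

def contains_all_vowels_in_order_alt (string : String) : Bool :=
  let s := (PySem.Str.lower string).toList
  pvLoopB ['u', 'o', 'i', 'e', 'a'] s s.length

-- ===== PRECONDITION & SPEC =====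
def Spec_contains_all_vowels_in_order (string : String) (out : Bool) : Prop := out = contains_all_vowels_in_order_alt string
instance (string : String) (out : Bool) : Decidable (Spec_contains_all_vowels_in_order string out) := by unfold Spec_contains_all_vowels_in_order; infer_instance

-- ===== CLAIM (what is proved, stated in full; the proofs are below) =====
def Claim_equal_contains_all_vowels_in_order : Prop := ∀ (string : String), Dom_contains_all_vowels_in_order string → Spec_contains_all_vowels_in_order string (contains_all_vowels_in_order string)

-- ===== LEMMAS AND PROOFS =====

-- proof-side forward greedy: consume the iterator up to and including the first v
def pvConsume (v : Char) : List Char → Option (List Char)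
  | [] => none
  | c :: cs => if c == v then some cs else pvConsume v cs

def pvAllIn : List Char → List Char → Bool
  | [], _ => true
  | v :: vs, it =>
      match pvConsume v it with
      | none => false
      | some it' => pvAllIn vs it'

-- A's index-threading scan equals the forward greedy on the remaining vowel suffix
theorem pvLoopA_eq_pvAllIn (cs : List Char) : ∀ i : Nat, i < 5 →
    pvLoopA ['a', 'e', 'i', 'o', 'u'] cs i = pvAllIn ((['a', 'e', 'i', 'o', 'u'] : List Char).drop i) cs := by
  induction cs with
  | nil =>
      intro i hi
      interval_cases i <;> rfl
  | cons c cs ih =>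
      intro i hi
      have ih0 := ih 0 (by omega); have ih1 := ih 1 (by omega); have ih2 := ih 2 (by omega)
      have ih3 := ih 3 (by omega); have ih4 := ih 4 (by omega)
      interval_cases i
      · by_cases hc : c = 'a' <;> simp [pvLoopA, pvAllIn, pvConsume, hc, ih0, ih1]
      · by_cases hc : c = 'e' <;> simp [pvLoopA, pvAllIn, pvConsume, hc, ih1, ih2]
      · by_cases hc : c = 'i' <;> simp [pvLoopA, pvAllIn, pvConsume, hc, ih2, ih3]
      · by_cases hc : c = 'o' <;> simp [pvLoopA, pvAllIn, pvConsume, hc, ih3, ih4]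
      · by_cases hc : c = 'u' <;> simp [pvLoopA, pvAllIn, pvConsume, hc, ih4]

theorem pvConsume_append_last (v c : Char) (xs : List Char) :
    pvConsume v (xs ++ [c]) =
      match pvConsume v xs with
      | some r => some (r ++ [c])
      | none => if c == v then some [] else none := by
  induction xs with
  | nil => simp [pvConsume]
  | cons x xs ih =>
      by_cases h : x = v <;> simp [pvConsume, h, ih]

-- rfind on the prefix of length e is the forward greedy on that prefix reversed
theorem pvRFind_consume (v : Char) (cs : List Char) : ∀ e : Nat,
    pvConsume v ((cs.take e).reverse) = (pvRFind v cs e).map (fun i => (cs.take i).reverse) := by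
  induction cs with
  | nil => intro e; simp [pvConsume, pvRFind]
  | cons c cs ih =>
      intro e
      cases e with
      | zero => simp [pvConsume, pvRFind]
      | succ e =>
          have h := ih e
          simp only [List.take_succ_cons, List.reverse_cons, pvRFind]
          rw [pvConsume_append_last, h]
          cases hr : pvRFind v cs e with
          | none =>
              by_cases hc : c = v <;> simp [hr, hc]
          | some i => simp [hr]

theorem pvLoopB_eq_pvAllIn (vs : List Char) : ∀ (cs : List Char) (e : Nat),
    pvLoopB vs cs e = pvAllIn vs ((cs.take e).reverse) := by
  induction vs with
  | nil => intro cs e; rfl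
  | cons v vs ih =>
      intro cs e
      simp only [pvLoopB, pvAllIn, pvRFind_consume]
      cases hr : pvRFind v cs e with
      | none => rfl
      | some i => simpa using ih cs i

theorem pvConsume_sublist {v : Char} {cs r : List Char} (h : pvConsume v cs = some r) :
    (v :: r).Sublist cs := by
  induction cs with
  | nil => simp [pvConsume] at h
  | cons c cs ih =>
      by_cases hc : c = v
      · simp [pvConsume, hc] at h
        subst hc; subst h; exact List.Sublist.refl _
      · simp [pvConsume, hc] at h
        exact (ih h).cons c

theorem pvSublist_consume {v : Char} {vs cs : List Char} (h : (v :: vs).Sublist cs) :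
    ∃ r, pvConsume v cs = some r ∧ vs.Sublist r := by
  induction cs with
  | nil => simp at h
  | cons c cs ih =>
      by_cases hc : c = v
      · subst hc
        have hvs : vs.Sublist cs := by
          cases h with
          | cons _ h' => exact (List.sublist_cons_self c vs).trans h'
          | cons₂ _ h' => exact h'
        exact ⟨cs, by simp [pvConsume], hvs⟩
      · have h' : (v :: vs).Sublist cs := by
          cases h with
          | cons _ h' => exact h'
          | cons₂ _ h' => exact absurd rfl hc
        obtain ⟨r, hr, hs⟩ := ih h'
        exact ⟨r, by simp [pvConsume, hc, hr], hs⟩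

theorem pvAllIn_iff_sublist (vs : List Char) : ∀ cs : List Char,
    pvAllIn vs cs = true ↔ vs.Sublist cs := by
  induction vs with
  | nil => intro cs; simp [pvAllIn]
  | cons v vs ih =>
      intro cs
      constructor
      · intro h
        simp only [pvAllIn] at h
        cases hr : pvConsume v cs with
        | none => rw [hr] at h; exact absurd h (by simp)
        | some r =>
            rw [hr] at h
            exact ((List.cons_sublist_cons.mpr ((ih r).mp h)).trans (pvConsume_sublist hr))
      · intro h
        obtain ⟨r, hr, hs⟩ := pvSublist_consume h
        simp [pvAllIn, hr, (ih r).mpr hs]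

-- ===== VERDICT (by name: the statement is the Claim_ definition above) =====
theorem contains_all_vowels_in_order_spec : Claim_equal_contains_all_vowels_in_order := by
  intro s _
  unfold Spec_contains_all_vowels_in_order contains_all_vowels_in_order contains_all_vowels_in_order_alt
  set cs := (PySem.Str.lower s).toList with hcs
  rw [pvLoopA_eq_pvAllIn cs 0 (by omega), pvLoopB_eq_pvAllIn, List.take_length]
  simp only [List.drop_zero]
  rw [Bool.eq_iff_iff, pvAllIn_iff_sublist, pvAllIn_iff_sublist]
  rw [show (['u','o','i','e','a'] : List Char) = (['a','e','i','o','u'] : List Char).reverse from rfl]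
  exact List.reverse_sublist.symm
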